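-- pv_equiv track=rewrite | github.com/minu0508/Algorithm | Python/Programmers/코딩 기초 트레이닝/x 사이의 개수.py | solution
-- ===== SOURCE A (Python) =====
-- def solution(myString):
--     myString += "x"
--     answer = []
--     step = 0
--     for i in myString:
--         if (i == "x"):
--             answer.append(step)
--             step = 0
--         else:
--             step += 1
--     return answer
-- ===== SOURCE B (Python) =====
-- def solution(myString):
--     return [len(seg) for seg in myString.split("x")]
-- ===== Notes on version B (the rewrite author's own statement) =====
-- stated objective: faster
-- what changed: Replaces the per-character Python counter loop with an appended sentinel by splitting the string on the separator and returning the segment lengths, moving the scan into C-level str.split.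
import Mathlib
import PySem

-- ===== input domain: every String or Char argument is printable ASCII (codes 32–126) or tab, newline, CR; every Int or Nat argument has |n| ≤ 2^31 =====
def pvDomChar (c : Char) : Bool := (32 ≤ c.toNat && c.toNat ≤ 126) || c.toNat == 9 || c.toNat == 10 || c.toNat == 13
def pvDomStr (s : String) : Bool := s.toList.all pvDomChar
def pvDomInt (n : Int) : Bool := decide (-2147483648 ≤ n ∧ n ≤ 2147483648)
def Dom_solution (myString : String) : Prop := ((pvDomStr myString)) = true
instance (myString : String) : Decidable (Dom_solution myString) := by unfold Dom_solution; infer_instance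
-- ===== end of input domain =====

-- B replaces A's per-character counter loop (with sentinel 'x' appended) by split('x') + segment lengths: simpler decomposition.

-- ===== PORT A =====
def solution (myString : String) : List Int :=
  -- myString += "x"; answer = []; step = 0; for i in myString: …
  let ms := myString ++ "x"
  (ms.toList.foldl
    (fun (st : List Int × Int) i =>
      if i == 'x' then (st.1 ++ [st.2], 0) else (st.1, st.2 + 1))
    ([], 0)).1

-- ===== PORT B =====
def solution_alt (myString : String) : List Int :=
  -- [len(seg) for seg in myString.split("x")]  (split with a nonempty separator = Chars.splitOn)
  (PySem.Chars.splitOn myString.toList ['x']).map (fun seg => (seg.length : Int))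

-- ===== PRECONDITION & SPEC =====
def Spec_solution (myString : String) (out : List Int) : Prop := out = solution_alt myString
instance (myString : String) (out : List Int) : Decidable (Spec_solution myString out) := by unfold Spec_solution; infer_instance

-- ===== CLAIM (what is proved, stated in full; the proofs are below) =====
def Claim_equal_solution : Prop := ∀ (myString : String), Dom_solution myString → Spec_solution myString (solution myString)

-- ===== LEMMAS AND PROOFS =====

/-- Structural version of splitting a char list at 'x'. -/
def spl : List Char → List (List Char)
  | [] => [[]]
  | c :: rest => if c = 'x' then [] :: spl rest else (spl rest).modifyHead (c :: ·)

lemma spl_ne_nil (l : List Char) : spl l ≠ [] := by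
  induction l with
  | nil => simp [spl]
  | cons c rest ih =>
    simp only [spl]
    split_ifs
    · simp
    · cases h : spl rest with
      | nil => exact absurd h ih
      | cons s t => simp [List.modifyHead]

lemma go_spec (l : List Char) (fuel : Nat) (cur : List Char) (acc : List (List Char))
    (h : l.length < fuel) :
    PySem.Chars.splitOn.go ['x'] fuel l cur acc
      = acc.reverse ++ (spl l).modifyHead (cur.reverse ++ ·) := by
  induction l generalizing fuel cur acc with
  | nil =>
    cases fuel with
    | zero => omega
    | succ f => simp [PySem.Chars.splitOn.go, spl]
  | cons c rest ih =>
    cases fuel with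
    | zero => omega
    | succ f =>
      have hf : rest.length < f := by simpa using h
      rw [PySem.Chars.splitOn.go]
      by_cases hc : c = 'x'
      · subst hc
        have hpre : List.isPrefixOf ['x'] ('x' :: rest) = true := by
          simp [List.isPrefixOf]
        simp only [hpre, if_pos, List.length_cons, List.length_nil, List.drop_succ_cons,
          List.drop_zero]
        rw [ih f [] (cur.reverse :: acc) hf]
        simp only [spl]
        cases spl rest <;> simp [List.modifyHead]
      · have hpre : List.isPrefixOf ['x'] (c :: rest) = false := by
          simp [List.isPrefixOf]
          exact fun hx => hc hx.symm
        simp only [hpre, Bool.false_eq_true, if_false]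
        rw [ih f (c :: cur) acc hf]
        simp only [spl, hc, if_neg, not_false_iff]
        congr 1
        cases hsr : spl rest with
        | nil => exact absurd hsr (spl_ne_nil rest)
        | cons s t => simp [List.modifyHead]

lemma splitOn_eq_spl (cs : List Char) : PySem.Chars.splitOn cs ['x'] = spl cs := by
  rw [PySem.Chars.splitOn, go_spec cs (cs.length + 1) [] [] (by omega)]
  cases hsr : spl cs with
  | nil => exact absurd hsr (spl_ne_nil cs)
  | cons s t => simp [List.modifyHead]

lemma map_modifyHead_len (L : List (List Char)) (c : Char) :
    (L.modifyHead (c :: ·)).map (fun seg => (seg.length : Int))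
      = (L.map (fun seg => (seg.length : Int))).modifyHead (fun n => 1 + n) := by
  cases L with
  | nil => simp
  | cons s t => simp [List.modifyHead]; ring

lemma foldA (cs : List Char) (ans : List Int) (step : Int) :
    ((cs ++ ['x']).foldl
      (fun (st : List Int × Int) i =>
        if i == 'x' then (st.1 ++ [st.2], 0) else (st.1, st.2 + 1))
      (ans, step)).1
    = ans ++ ((spl cs).map (fun seg => (seg.length : Int))).modifyHead (fun n => step + n) := by
  induction cs generalizing ans step with
  | nil => simp [spl, List.foldl]
  | cons c rest ih =>
    by_cases hc : c = 'x'
    · subst hc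
      simp only [List.cons_append, List.foldl_cons, beq_self_eq_true, if_pos]
      rw [ih (ans ++ [step]) 0]
      cases hM : (spl rest).map (fun seg => (seg.length : Int)) with
      | nil =>
        rw [List.map_eq_nil_iff] at hM
        exact absurd hM (spl_ne_nil rest)
      | cons m t => simp [spl, List.modifyHead, hM]
    · have hb : (c == 'x') = false := by simp [hc]
      simp only [List.cons_append, List.foldl_cons, hb, Bool.false_eq_true, if_false]
      rw [ih ans (step + 1)]
      simp only [spl, hc, if_neg, not_false_iff, map_modifyHead_len]
      congr 1
      cases h : (spl rest).map (fun seg => (seg.length : Int)) with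
      | nil => simp
      | cons n t => simp [List.modifyHead]; ring

-- ===== VERDICT (by name: the statement is the Claim_ definition above) =====
theorem solution_spec : Claim_equal_solution := by
  intro myString _
  unfold Spec_solution solution solution_alt
  simp only [String.toList_append]
  have : ("x" : String).toList = ['x'] := rfl
  rw [this, foldA, splitOn_eq_spl]
  cases h : (spl myString.toList).map (fun seg => (seg.length : Int)) with
  | nil => simp
  | cons n t => simp [List.modifyHead]
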